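-- pv_equiv track=rewrite | github.com/riffsircar/blend-elites | get_label.py | get_label_cv
-- ===== SOURCE A (Python) =====
-- def get_label_cv(level):
-- 	#{'#': 0, '-': 1, '0': 2, '1': 3, '2': 4, '4': 5, '5': 6, '7': 7, '>': 8, 'A': 9, 'B': 10, 'D': 11, 'E': 12, 'F': 13, 'G': 14, 'H': 15,
-- 	# 'K': 16, 'M': 17, 'O': 18, 'P': 19, 'R': 20, 'S': 21, 'U': 22, 'V': 23, 'X': 24, '|': 25}
-- 	label = [False] * 7  # E/V, D, |, #/2/>/A/H/O, 0/1/4/5/7/F/G/K/R/S/U, M, B i.e. Enemy/Hzard, Door, Ladder, Weapons, Powerups, Moving, Breakable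
-- 	temp = ''
-- 	for l in level:
-- 		temp += ''.join(l)
-- 	if 'E' in temp or 'V' in temp:
-- 		label[0] = True
-- 	if 'D' in temp:
-- 		label[1] = True
-- 	if '|' in temp:
-- 		label[2] = True
-- 	if '#' in temp or '2' in temp or 'A' in temp or 'H' in temp or 'O' in temp:
-- 		label[3] = True
-- 	if '0' in temp or '1' in temp or '4' in temp or '5' in temp or '7' in temp or 'F' in temp or 'G' in temp or 'K' in temp or 'R' in temp or 'S' in temp or 'U' in temp:
-- 		label[4] = True
-- 	if 'M' in temp:
-- 		label[5] = True
-- 	if 'B' in temp: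
-- 		label[6] = True
-- 	return label
-- ===== SOURCE B (Python) =====
-- _IDX = {'E': 0, 'V': 0, 'D': 1, '|': 2,
--         '#': 3, '2': 3, 'A': 3, 'H': 3, 'O': 3,
--         '0': 4, '1': 4, '4': 4, '5': 4, '7': 4,
--         'F': 4, 'G': 4, 'K': 4, 'R': 4, 'S': 4, 'U': 4,
--         'M': 5, 'B': 6}
--
-- def get_label_cv(level):
-- 	label = [False] * 7
-- 	for row in level:
-- 		for ch in ''.join(row):
-- 			i = _IDX.get(ch)
-- 			if i is not None:
-- 				label[i] = True
-- 	return label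
-- ===== Notes on version B (the rewrite author's own statement) =====
-- stated objective: simpler
-- what changed: Replaced the string concatenation plus seven independent per-category membership scans by one dict mapping each relevant character to its label index and a single dispatch pass over the level's characters that sets the corresponding flag.
import Mathlib
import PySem

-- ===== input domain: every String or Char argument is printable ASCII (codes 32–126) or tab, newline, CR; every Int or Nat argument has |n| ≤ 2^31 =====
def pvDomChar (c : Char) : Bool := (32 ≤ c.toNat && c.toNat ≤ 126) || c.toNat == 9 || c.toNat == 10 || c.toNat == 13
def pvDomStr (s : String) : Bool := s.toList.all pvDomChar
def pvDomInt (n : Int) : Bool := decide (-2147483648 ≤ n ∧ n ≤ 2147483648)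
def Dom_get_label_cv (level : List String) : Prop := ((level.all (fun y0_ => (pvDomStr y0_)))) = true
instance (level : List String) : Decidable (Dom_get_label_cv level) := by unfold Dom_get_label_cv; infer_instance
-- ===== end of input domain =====

-- B replaces A's string concatenation plus seven per-category membership scans by one
-- char→index table and a single pass over the level's characters (simpler, one dispatch pass).

-- ===== PORT A =====
-- Python strings are ported as List Char (temp += ''.join(l) is list append; 'x' in temp is contains).
-- Each `if cond: label[i] = True` on the all-False initial list makes label[i] equal cond.
def get_label_cv (level : List String) : List Bool :=
  let temp : List Char := level.foldl (fun t l => t ++ l.toList) []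
  [temp.contains 'E' || temp.contains 'V',
   temp.contains 'D',
   temp.contains '|',
   temp.contains '#' || temp.contains '2' || temp.contains 'A' || temp.contains 'H' || temp.contains 'O',
   temp.contains '0' || temp.contains '1' || temp.contains '4' || temp.contains '5' || temp.contains '7' ||
     temp.contains 'F' || temp.contains 'G' || temp.contains 'K' || temp.contains 'R' || temp.contains 'S' || temp.contains 'U',
   temp.contains 'M',
   temp.contains 'B']

-- ===== PORT B =====
-- the dict _IDX, as a lookup function (first-match association, keys distinct)
def idxOf (c : Char) : Option Nat :=
  if c = 'E' then some 0 else if c = 'V' then some 0 else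
  if c = 'D' then some 1 else if c = '|' then some 2 else
  if c = '#' then some 3 else if c = '2' then some 3 else if c = 'A' then some 3 else
  if c = 'H' then some 3 else if c = 'O' then some 3 else
  if c = '0' then some 4 else if c = '1' then some 4 else if c = '4' then some 4 else
  if c = '5' then some 4 else if c = '7' then some 4 else if c = 'F' then some 4 else
  if c = 'G' then some 4 else if c = 'K' then some 4 else if c = 'R' then some 4 else
  if c = 'S' then some 4 else if c = 'U' then some 4 else
  if c = 'M' then some 5 else if c = 'B' then some 6 else none

def stepB (lab : List Bool) (c : Char) : List Bool :=
  match idxOf c with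
  | some i => lab.set i true
  | none => lab

def get_label_cv_alt (level : List String) : List Bool :=
  level.foldl (fun lab row => row.toList.foldl stepB lab) (List.replicate 7 false)

-- ===== PRECONDITION & SPEC =====
def Spec_get_label_cv (level : List String) (out : List Bool) : Prop := out = get_label_cv_alt level
instance (level : List String) (out : List Bool) : Decidable (Spec_get_label_cv level out) := by unfold Spec_get_label_cv; infer_instance

-- ===== CLAIM (what is proved, stated in full; the proofs are below) =====
def Claim_equal_get_label_cv : Prop := ∀ (level : List String), Dom_get_label_cv level → Spec_get_label_cv level (get_label_cv level)

-- ===== LEMMAS AND PROOFS =====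

def qI (i : Nat) (c : Char) : Bool := idxOf c == some i

def allKeys : List Char :=
  ['E','V','D','|','#','2','A','H','O','0','1','4','5','7','F','G','K','R','S','U','M','B']

theorem idxOf_not_key (c : Char) (h : c ∉ allKeys) : idxOf c = none := by
  simp only [allKeys, List.mem_cons, List.not_mem_nil, or_false, not_or] at h
  obtain ⟨h1,h2,h3,h4,h5,h6,h7,h8,h9,h10,h11,h12,h13,h14,h15,h16,h17,h18,h19,h20,h21,h22⟩ := h
  unfold idxOf
  rw [if_neg h1, if_neg h2, if_neg h3, if_neg h4, if_neg h5, if_neg h6, if_neg h7,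
      if_neg h8, if_neg h9, if_neg h10, if_neg h11, if_neg h12, if_neg h13, if_neg h14,
      if_neg h15, if_neg h16, if_neg h17, if_neg h18, if_neg h19, if_neg h20,
      if_neg h21, if_neg h22]

theorem idxOf_le (c : Char) (i : Nat) (h : idxOf c = some i) : i ≤ 6 := by
  by_cases hm : c ∈ allKeys
  · fin_cases hm <;> simp_all [idxOf] <;> omega
  · rw [idxOf_not_key c hm] at h; cases h

theorem qI_iff (i : Nat) (ks : List Char) (hsub : ∀ k ∈ ks, k ∈ allKeys)
    (hkey : ∀ k ∈ allKeys, (qI i k = true ↔ k ∈ ks)) (c : Char) :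
    qI i c = true ↔ c ∈ ks := by
  by_cases hm : c ∈ allKeys
  · exact hkey c hm
  · rw [qI, idxOf_not_key c hm]
    simp only [beq_iff_eq, reduceCtorEq, false_iff]
    exact fun hk => hm (hsub c hk)

theorem stepB_eq (c : Char) (b0 b1 b2 b3 b4 b5 b6 : Bool) :
    stepB [b0, b1, b2, b3, b4, b5, b6] c =
      [b0 || qI 0 c, b1 || qI 1 c, b2 || qI 2 c, b3 || qI 3 c, b4 || qI 4 c, b5 || qI 5 c, b6 || qI 6 c] := by
  unfold stepB
  cases h : idxOf c with
  | none => simp [qI, h]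
  | some i =>
    have hi : i ≤ 6 := idxOf_le c i h
    interval_cases i <;> simp [qI, h, List.set]

theorem foldB_eq (cs : List Char) (b0 b1 b2 b3 b4 b5 b6 : Bool) :
    cs.foldl stepB [b0, b1, b2, b3, b4, b5, b6] =
      [b0 || cs.any (qI 0), b1 || cs.any (qI 1), b2 || cs.any (qI 2), b3 || cs.any (qI 3),
       b4 || cs.any (qI 4), b5 || cs.any (qI 5), b6 || cs.any (qI 6)] := by
  induction cs generalizing b0 b1 b2 b3 b4 b5 b6 with
  | nil => simp
  | cons c cs ih =>
    rw [List.foldl_cons, stepB_eq, ih]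
    simp [Bool.or_assoc]

theorem tempA_eq (level : List String) (t : List Char) :
    level.foldl (fun t l => t ++ l.toList) t = t ++ (level.map String.toList).flatten := by
  induction level generalizing t with
  | nil => simp
  | cons s level ih => simp [ih, List.append_assoc]

theorem foldB_flatten (level : List String) (lab : List Bool) :
    level.foldl (fun lab row => row.toList.foldl stepB lab) lab =
      ((level.map String.toList).flatten).foldl stepB lab := by
  induction level generalizing lab with
  | nil => simp
  | cons s level ih => simp [ih, List.foldl_append]

theorem any_qI_eq (C : List Char) (i : Nat) (ks : List Char)
    (h : ∀ c, qI i c = true ↔ c ∈ ks) :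
    C.any (qI i) = ks.any (fun k => C.contains k) := by
  rw [Bool.eq_iff_iff]
  simp only [List.any_eq_true, List.contains_eq_mem, decide_eq_true_eq, h]
  constructor
  · rintro ⟨c, hc, hk⟩; exact ⟨c, hk, hc⟩
  · rintro ⟨k, hk, hc⟩; exact ⟨k, hc, hk⟩

theorem get_label_cv_spec' (level : List String) :
    get_label_cv level = get_label_cv_alt level := by
  unfold get_label_cv get_label_cv_alt
  rw [foldB_flatten, tempA_eq, List.nil_append]
  show _ = (((level.map String.toList).flatten).foldl stepB [false, false, false, false, false, false, false])
  rw [foldB_eq]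
  set C := (level.map String.toList).flatten with hC
  have h0 := any_qI_eq C 0 ['E', 'V'] (qI_iff 0 _ (by intro k hk; fin_cases hk <;> decide) (by intro k hk; fin_cases hk <;> decide))
  have h1 := any_qI_eq C 1 ['D'] (qI_iff 1 _ (by intro k hk; fin_cases hk <;> decide) (by intro k hk; fin_cases hk <;> decide))
  have h2 := any_qI_eq C 2 ['|'] (qI_iff 2 _ (by intro k hk; fin_cases hk <;> decide) (by intro k hk; fin_cases hk <;> decide))
  have h3 := any_qI_eq C 3 ['#', '2', 'A', 'H', 'O'] (qI_iff 3 _ (by intro k hk; fin_cases hk <;> decide) (by intro k hk; fin_cases hk <;> decide))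
  have h4 := any_qI_eq C 4 ['0', '1', '4', '5', '7', 'F', 'G', 'K', 'R', 'S', 'U']
    (qI_iff 4 _ (by intro k hk; fin_cases hk <;> decide) (by intro k hk; fin_cases hk <;> decide))
  have h5 := any_qI_eq C 5 ['M'] (qI_iff 5 _ (by intro k hk; fin_cases hk <;> decide) (by intro k hk; fin_cases hk <;> decide))
  have h6 := any_qI_eq C 6 ['B'] (qI_iff 6 _ (by intro k hk; fin_cases hk <;> decide) (by intro k hk; fin_cases hk <;> decide))
  simp [h0, h1, h2, h3, h4, h5, h6, List.any_cons, Bool.or_assoc]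

-- ===== VERDICT (by name: the statement is the Claim_ definition above) =====
theorem get_label_cv_spec : Claim_equal_get_label_cv := by
  intro level _
  exact get_label_cv_spec' level
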